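-- pv_equiv track=rewrite | github.com/gachon-CCLab/FedOps | multimodal/Usecases/FedTFT/experiments/analysis/feature_ablation.py | get_feature_masks
-- ===== SOURCE A (Python) =====
-- N_SEQ_FEATURES = 25   # columns in each timestep of sequence
--
-- COSINOR_KEYWORDS    = ["cosinor", "mesor", "amplitude", "acrophase", "r2",
--                        "circadian", "cos_", "sin_", "periodic", "phase"]
--
-- LOCATION_KEYWORDS   = ["entropy", "variability", "place_", "location",
--                        "room", "ward", "hallway", "semantic"]
--
-- TREATMENT_KEYWORDS  = ["treatment", "injection", "medication_time",
--                        "med_time", "admin_time", "therapy_time",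
--                        "procedure_time", "inject"]
--
-- STATIC_FEATURE_NAMES = [
--     "HR_nunique", "nonwearing", "VE_tx", "VE_tx_inj_time",
--     "Restrictive_Intervention", "sex", "DIG_3class", "DIG_4class",
--     "DIG_withPsychosis", "day_of_week", "holidays",
--     "place_hallway", "place_other", "place_ward",
-- ]
--
-- TREATMENT_STATIC_KEYWORDS = ["ve_tx", "tx_inj", "restrictive"]
--
-- def get_feature_masks(feature_names, n_seq_features=N_SEQ_FEATURES):
--     """
--     Returns a dict with keys 'seq' and 'static', each a dict of
--     {feature_type: set of column indices to ZERO OUT}.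
--     """
--     seq_names = feature_names[:n_seq_features] if feature_names else []
--
--     def seq_matching(keywords):
--         if not seq_names:
--             return set()
--         return {i for i, name in enumerate(seq_names)
--                 if any(kw.lower() in name.lower() for kw in keywords)}
--
--     def static_matching(keywords):
--         return {i for i, name in enumerate(STATIC_FEATURE_NAMES)
--                 if any(kw.lower() in name.lower() for kw in keywords)}
--
--     seq_masks = {
--         "cosinor":   seq_matching(COSINOR_KEYWORDS),
--         "location":  seq_matching(LOCATION_KEYWORDS),
--         "treatment": seq_matching(TREATMENT_KEYWORDS),   # likely empty
--     }
--     static_masks = {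
--         "treatment": static_matching(TREATMENT_STATIC_KEYWORDS),  # VE_tx, Restrictive
--     }
--     return {"seq": seq_masks, "static": static_masks}
-- ===== SOURCE B (Python) =====
-- N_SEQ_FEATURES = 25
--
-- COSINOR_KEYWORDS    = ["cosinor", "mesor", "amplitude", "acrophase", "r2",
--                        "circadian", "cos_", "sin_", "periodic", "phase"]
--
-- LOCATION_KEYWORDS   = ["entropy", "variability", "place_", "location",
--                        "room", "ward", "hallway", "semantic"]
--
-- TREATMENT_KEYWORDS  = ["treatment", "injection", "medication_time",
--                        "med_time", "admin_time", "therapy_time",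
--                        "procedure_time", "inject"]
--
-- STATIC_FEATURE_NAMES = [
--     "HR_nunique", "nonwearing", "VE_tx", "VE_tx_inj_time",
--     "Restrictive_Intervention", "sex", "DIG_3class", "DIG_4class",
--     "DIG_withPsychosis", "day_of_week", "holidays",
--     "place_hallway", "place_other", "place_ward",
-- ]
--
-- TREATMENT_STATIC_KEYWORDS = ["ve_tx", "tx_inj", "restrictive"]
--
--
-- def get_feature_masks(feature_names, n_seq_features=N_SEQ_FEATURES):
--     """Single pass over the truncated names, classifying each into all
--     matching groups at once; second single pass over the static names."""
--     cos, loc, trt = set(), set(), set()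
--     for i, name in enumerate(feature_names[:n_seq_features]):
--         low = name.lower()
--         if any(kw.lower() in low for kw in COSINOR_KEYWORDS):
--             cos.add(i)
--         if any(kw.lower() in low for kw in LOCATION_KEYWORDS):
--             loc.add(i)
--         if any(kw.lower() in low for kw in TREATMENT_KEYWORDS):
--             trt.add(i)
--     static_trt = set()
--     for i, name in enumerate(STATIC_FEATURE_NAMES):
--         if any(kw in name.lower() for kw in TREATMENT_STATIC_KEYWORDS):
--             static_trt.add(i)
--     return {"seq": {"cosinor": cos, "location": loc, "treatment": trt},
--             "static": {"treatment": static_trt}}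
-- ===== Notes on version B (the rewrite author's own statement) =====
-- stated objective: alternative
-- what changed: Replaces the three separate set-comprehension scans of the truncated name list (one per keyword group, each re-lowercasing every name) by one loop over the names that lowercases each name once and adds its index to every matching group's set, plus one loop for the static names.
import Mathlib
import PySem

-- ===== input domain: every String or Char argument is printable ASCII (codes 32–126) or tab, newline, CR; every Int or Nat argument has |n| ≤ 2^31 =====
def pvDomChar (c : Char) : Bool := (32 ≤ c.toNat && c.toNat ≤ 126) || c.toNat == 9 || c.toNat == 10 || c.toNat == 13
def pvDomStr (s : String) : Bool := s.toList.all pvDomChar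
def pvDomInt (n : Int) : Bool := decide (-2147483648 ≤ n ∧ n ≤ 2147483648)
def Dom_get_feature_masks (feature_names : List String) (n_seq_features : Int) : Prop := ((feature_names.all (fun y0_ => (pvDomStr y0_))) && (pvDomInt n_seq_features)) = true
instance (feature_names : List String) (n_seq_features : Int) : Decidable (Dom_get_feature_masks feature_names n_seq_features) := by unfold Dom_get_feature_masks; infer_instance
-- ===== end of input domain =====

-- B replaces A's three separate filtered scans (one per keyword group) by one single-pass fold
-- that lowercases each name once and extends all three index sets at once (objective: alternative).


-- module constants shared by both Pythons
def pvCOS : List String := ["cosinor", "mesor", "amplitude", "acrophase", "r2",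
                            "circadian", "cos_", "sin_", "periodic", "phase"]
def pvLOC : List String := ["entropy", "variability", "place_", "location",
                            "room", "ward", "hallway", "semantic"]
def pvTRT : List String := ["treatment", "injection", "medication_time",
                            "med_time", "admin_time", "therapy_time",
                            "procedure_time", "inject"]
def pvSTATIC : List String := ["HR_nunique", "nonwearing", "VE_tx", "VE_tx_inj_time",
                               "Restrictive_Intervention", "sex", "DIG_3class", "DIG_4class",
                               "DIG_withPsychosis", "day_of_week", "holidays",
                               "place_hallway", "place_other", "place_ward"]
def pvTRTS : List String := ["ve_tx", "tx_inj", "restrictive"]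

-- ===== PORT A =====
-- set comprehension {i for i, name in enumerate(...) if any(kw.lower() in name.lower())}
-- ported as filtered enumerate (indices are distinct, in increasing insertion order)
def pvSeqMatching (seq_names : List String) (keywords : List String) : List Int :=
  ((PySem.List.enumerate seq_names 0).filter
    (fun p => keywords.any (fun kw => PySem.Str.isIn (PySem.Str.lower kw) (PySem.Str.lower p.2)))).map (·.1)

def pvStaticMatching (keywords : List String) : List Int :=
  ((PySem.List.enumerate pvSTATIC 0).filter
    (fun p => keywords.any (fun kw => PySem.Str.isIn (PySem.Str.lower kw) (PySem.Str.lower p.2)))).map (·.1)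

def get_feature_masks (feature_names : List String) (n_seq_features : Int) : List (String × List (String × List Int)) :=
  let seq_names := if feature_names.isEmpty then [] else PySem.List.slice feature_names none (some n_seq_features)
  [("seq", [("cosinor", pvSeqMatching seq_names pvCOS),
            ("location", pvSeqMatching seq_names pvLOC),
            ("treatment", pvSeqMatching seq_names pvTRT)]),
   ("static", [("treatment", pvStaticMatching pvTRTS)])]

-- ===== PORT B =====
def get_feature_masks_alt (feature_names : List String) (n_seq_features : Int) : List (String × List (String × List Int)) :=
  let acc :=
    (PySem.List.enumerate (PySem.List.slice feature_names none (some n_seq_features)) 0).foldl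
      (fun (acc : List Int × List Int × List Int) p =>
        let low := PySem.Str.lower p.2
        ((if pvCOS.any (fun kw => PySem.Str.isIn (PySem.Str.lower kw) low) then acc.1 ++ [p.1] else acc.1),
         (if pvLOC.any (fun kw => PySem.Str.isIn (PySem.Str.lower kw) low) then acc.2.1 ++ [p.1] else acc.2.1),
         (if pvTRT.any (fun kw => PySem.Str.isIn (PySem.Str.lower kw) low) then acc.2.2 ++ [p.1] else acc.2.2)))
      ([], [], [])
  let static_trt :=
    (PySem.List.enumerate pvSTATIC 0).foldl
      (fun (s : List Int) p =>
        if pvTRTS.any (fun kw => PySem.Str.isIn kw (PySem.Str.lower p.2)) then s ++ [p.1] else s)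
      []
  [("seq", [("cosinor", acc.1), ("location", acc.2.1), ("treatment", acc.2.2)]),
   ("static", [("treatment", static_trt)])]

-- ===== PRECONDITION & SPEC =====
def Spec_get_feature_masks (feature_names : List String) (n_seq_features : Int) (out : List (String × List (String × List Int))) : Prop := out = get_feature_masks_alt feature_names n_seq_features
instance (feature_names : List String) (n_seq_features : Int) (out : List (String × List (String × List Int))) : Decidable (Spec_get_feature_masks feature_names n_seq_features out) := by unfold Spec_get_feature_masks; infer_instance

-- ===== CLAIM (what is proved, stated in full; the proofs are below) =====
def Claim_equal_get_feature_masks : Prop := ∀ (feature_names : List String) (n_seq_features : Int), Dom_get_feature_masks feature_names n_seq_features → Spec_get_feature_masks feature_names n_seq_features (get_feature_masks feature_names n_seq_features)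

-- ===== LEMMAS AND PROOFS =====

-- one triple-accumulator fold = three filtered projections
theorem pv_fold3 (p1 p2 p3 : Int × String → Bool) (l : List (Int × String)) (a1 a2 a3 : List Int) :
    l.foldl
      (fun (acc : List Int × List Int × List Int) p =>
        ((if p1 p then acc.1 ++ [p.1] else acc.1),
         (if p2 p then acc.2.1 ++ [p.1] else acc.2.1),
         (if p3 p then acc.2.2 ++ [p.1] else acc.2.2)))
      (a1, a2, a3)
    = (a1 ++ (l.filter p1).map (·.1), a2 ++ (l.filter p2).map (·.1), a3 ++ (l.filter p3).map (·.1)) := by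
  induction l generalizing a1 a2 a3 with
  | nil => simp
  | cons x xs ih =>
    simp only [List.foldl_cons, List.filter_cons]
    rw [ih]
    split_ifs <;> simp

-- single-accumulator fold = filtered projection
theorem pv_fold1 (q : Int × String → Bool) (l : List (Int × String)) (a : List Int) :
    l.foldl (fun (s : List Int) p => if q p then s ++ [p.1] else s) a
    = a ++ (l.filter q).map (·.1) := by
  induction l generalizing a with
  | nil => simp
  | cons x xs ih =>
    simp only [List.foldl_cons, List.filter_cons]
    rw [ih]
    split_ifs <;> simp

-- the empty-list guard in A is redundant: slicing [] gives []
theorem pv_seq_names_eq (fn : List String) (n : Int) :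
    (if fn.isEmpty then ([] : List String) else PySem.List.slice fn none (some n))
    = PySem.List.slice fn none (some n) := by
  cases fn with
  | nil => simp [PySem.List.slice]
  | cons x xs => simp

-- the static components agree: pvTRTS keywords are already lowercase, so B's test without .lower() matches
theorem pv_static_eq :
    ((PySem.List.enumerate pvSTATIC 0).filter
      (fun p => pvTRTS.any (fun kw => PySem.Str.isIn kw (PySem.Str.lower p.2)))).map (·.1)
    = pvStaticMatching pvTRTS := by decide

-- ===== VERDICT (by name: the statement is the Claim_ definition above) =====
theorem get_feature_masks_spec : Claim_equal_get_feature_masks := by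
  intro fn n _
  simp only [Spec_get_feature_masks, get_feature_masks, get_feature_masks_alt]
  rw [pv_seq_names_eq, pv_fold3, pv_fold1, pv_static_eq]
  simp [pvSeqMatching]
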